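-- pv_equiv track=rewrite | github.com/tmfreiberg/euclids_algorithm_analysis | euclids_algorithm_analysis.py | heilbronn
-- ===== SOURCE A (Python) =====
-- def gcd_steps(a,b,i): # Input i = 0
--     if b == 0:
--         return abs(a), i # Output gcd(a,b) and i = T(a,b)
--     i += 1
--     return gcd_steps(b,a%b,i)
--
-- def heilbronn(gcdlist, list1):
--     list1.sort()
--     output_dictionary_restricted = {}
--     output_dictionary_all = {}
--     for a in list1:
--         output_dictionary_restricted[a] = {}
--         output_dictionary_all[a] = {}
--         for b in range(1,a+1):
--             g, s = gcd_steps(a,b,0)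
--             if (g in gcdlist):
--                 if s in output_dictionary_restricted[a].keys():
--                     output_dictionary_restricted[a][s] += 1
--                 else:
--                     output_dictionary_restricted[a][s] = 1
--             if s in output_dictionary_all[a].keys():
--                 output_dictionary_all[a][s] += 1
--             else:
--                 output_dictionary_all[a][s] = 1
--     return output_dictionary_restricted, output_dictionary_all
-- ===== SOURCE B (Python) =====
-- def heilbronn(gcdlist, list1):
--     # Same observable mutation as A: list1 is sorted in place.
--     list1.sort()
--     gset = set(gcdlist)
--     restricted = {}
--     alld = {}
--     for a in list1:
--         r = {}
--         t = {}
--         for b in range(1, a + 1):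
--             # iterative Euclid: x ends as +-gcd(a,b), s counts the divisions
--             x, y, s = a, b, 0
--             while y:
--                 x, y = y, x % y
--                 s += 1
--             t[s] = t.get(s, 0) + 1
--             if abs(x) in gset:
--                 r[s] = r.get(s, 0) + 1
--         restricted[a] = r
--         alld[a] = t
--     return restricted, alld
-- ===== Notes on version B (the rewrite author's own statement) =====
-- stated objective: faster
-- what changed: The recursive gcd_steps helper is replaced by an inline iterative Euclid loop, the per-pair 'g in gcdlist' list scan is replaced by one set built once, and each per-a histogram is accumulated in fresh local dicts (with dict.get) and installed at the end instead of being mutated inside the outer dicts.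
import Mathlib
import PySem

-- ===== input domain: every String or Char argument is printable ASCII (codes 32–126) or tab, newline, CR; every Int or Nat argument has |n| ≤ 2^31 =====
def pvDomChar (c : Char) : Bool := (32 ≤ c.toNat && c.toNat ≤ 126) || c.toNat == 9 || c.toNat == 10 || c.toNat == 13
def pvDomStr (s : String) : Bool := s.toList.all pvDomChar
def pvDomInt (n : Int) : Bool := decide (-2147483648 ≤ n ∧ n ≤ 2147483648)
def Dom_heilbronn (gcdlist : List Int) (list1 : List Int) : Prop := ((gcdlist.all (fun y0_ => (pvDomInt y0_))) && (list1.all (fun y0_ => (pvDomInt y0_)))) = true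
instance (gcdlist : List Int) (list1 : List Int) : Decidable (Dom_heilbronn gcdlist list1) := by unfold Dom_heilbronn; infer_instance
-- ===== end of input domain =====

-- B replaces A's recursive gcd_steps helper by an inline iterative Euclid loop, a set for the
-- gcdlist membership test, and per-a local histogram dicts installed at the end; return-value
-- equivalence (both mutate list1 by sorting it in place, as A does).


-- termination fact for both Euclid recursions (Python % = PySem.Int.mod, divisor-signed)
theorem pvMod_natAbs_lt (a b : Int) (hb : b ≠ 0) : (PySem.Int.mod a b).natAbs < b.natAbs := by
  rcases lt_or_gt_of_ne hb with h | h
  · have := PySem.Int.mod_neg_bounds a h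
    omega
  · have h1 := PySem.Int.mod_nonneg a h
    have h2 := PySem.Int.mod_lt a h
    omega

-- ===== PORT A =====
-- gcd_steps(a, b, i)
def gcdSteps (a b i : Int) : Int × Int :=
  if hb : b = 0 then (|a|, i)
  else gcdSteps b (PySem.Int.mod a b) (i + 1)
termination_by b.natAbs
decreasing_by exact pvMod_natAbs_lt a b hb

def heilbronn (gcdlist : List Int) (list1 : List Int) : (List (Int × List (Int × Int))) × (List (Int × List (Int × Int))) :=
  let sorted := PySem.List.sorted list1 (fun x => x) false
  let st :=
    sorted.foldl (fun (p : PySem.Dict Int (PySem.Dict Int Int) × PySem.Dict Int (PySem.Dict Int Int)) a =>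
      let p := (p.1.insert a PySem.Dict.empty, p.2.insert a PySem.Dict.empty)
      (PySem.List.pyRange 1 (a + 1) 1).foldl (fun q b =>
        let gs := gcdSteps a b 0
        let g := gs.1
        let s := gs.2
        let q1 :=
          if gcdlist.contains g then
            q.1.modify a PySem.Dict.empty (fun m =>
              if (m.get? s).isSome then m.insert s (m.getD s 0 + 1) else m.insert s 1)
          else q.1
        let q2 :=
          q.2.modify a PySem.Dict.empty (fun m =>
            if (m.get? s).isSome then m.insert s (m.getD s 0 + 1) else m.insert s 1)
        (q1, q2)) p)
      (PySem.Dict.empty, PySem.Dict.empty)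
  (st.1.items.map (fun kv => (kv.1, kv.2.items)), st.2.items.map (fun kv => (kv.1, kv.2.items)))

-- ===== PORT B =====
-- the inline 'x, y, s = a, b, 0; while y: x, y = y, x % y; s += 1' loop
def euclidLoop (x y s : Int) : Int × Int :=
  if hy : y = 0 then (x, s)
  else euclidLoop y (PySem.Int.mod x y) (s + 1)
termination_by y.natAbs
decreasing_by exact pvMod_natAbs_lt x y hy

def heilbronn_alt (gcdlist : List Int) (list1 : List Int) : (List (Int × List (Int × Int))) × (List (Int × List (Int × Int))) :=
  let sorted := PySem.List.sorted list1 (fun x => x) false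
  let gset : PySem.Set Int := PySem.Set.ofList gcdlist
  let st :=
    sorted.foldl (fun (p : PySem.Dict Int (PySem.Dict Int Int) × PySem.Dict Int (PySem.Dict Int Int)) a =>
      let rt :=
        (PySem.List.pyRange 1 (a + 1) 1).foldl (fun (rt : PySem.Dict Int Int × PySem.Dict Int Int) b =>
          let xs := euclidLoop a b 0
          let x := xs.1
          let s := xs.2
          let t := rt.2.insert s (rt.2.getD s 0 + 1)
          let r := if PySem.Set.contains gset |x| then rt.1.insert s (rt.1.getD s 0 + 1) else rt.1
          (r, t)) (PySem.Dict.empty, PySem.Dict.empty)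
      (p.1.insert a rt.1, p.2.insert a rt.2)) (PySem.Dict.empty, PySem.Dict.empty)
  (st.1.items.map (fun kv => (kv.1, kv.2.items)), st.2.items.map (fun kv => (kv.1, kv.2.items)))

-- ===== PRECONDITION & SPEC =====
def Spec_heilbronn (gcdlist : List Int) (list1 : List Int) (out : (List (Int × List (Int × Int))) × (List (Int × List (Int × Int)))) : Prop := out = heilbronn_alt gcdlist list1
instance (gcdlist : List Int) (list1 : List Int) (out : (List (Int × List (Int × Int))) × (List (Int × List (Int × Int)))) : Decidable (Spec_heilbronn gcdlist list1 out) := by unfold Spec_heilbronn; infer_instance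

-- ===== CLAIM (what is proved, stated in full; the proofs are below) =====
def Claim_equal_heilbronn : Prop := ∀ (gcdlist : List Int) (list1 : List Int), Dom_heilbronn gcdlist list1 → Spec_heilbronn gcdlist list1 (heilbronn gcdlist list1)

-- ===== LEMMAS AND PROOFS =====

-- gcd_steps a b i = (|x|, s) where (x, s) is the result of B's iterative loop
theorem gcdSteps_eq_euclidLoop (a b i : Int) :
    gcdSteps a b i = (|(euclidLoop a b i).1|, (euclidLoop a b i).2) := by
  induction a, b, i using gcdSteps.induct with
  | case1 a i => rw [gcdSteps, euclidLoop]; simp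
  | case2 a b i hb ih => rw [gcdSteps, euclidLoop]; simp [hb, ih]

-- A's in-or-increment branch is B's unconditional get-based increment
theorem innerStep_eq (m : PySem.Dict Int Int) (s : Int) :
    (if (m.get? s).isSome then m.insert s (m.getD s 0 + 1) else m.insert s 1) =
      m.insert s (m.getD s 0 + 1) := by
  by_cases h : (m.get? s).isSome
  · simp [h]
  · rcases Option.not_isSome_iff_eq_none.mp h with hn
    simp [PySem.Dict.getD_eq_get?_getD, hn]

-- membership in set(gcdlist) is membership in gcdlist
theorem setContains_eq (gcdlist : List Int) (v : Int) :
    PySem.Set.contains (PySem.Set.ofList gcdlist) v = gcdlist.contains v := by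
  by_cases h : v ∈ gcdlist
  · simp [PySem.Set.contains_eq_listContains, PySem.Set.mem_ofList, h]
  · simp [PySem.Set.contains_eq_listContains, PySem.Set.mem_ofList, h]

-- a loop of modifies at one present key is that key's value looped on
theorem foldl_modify_insert {ν : Type} (l : List Int) (d : PySem.Dict Int ν) (a : Int)
    (m d0 : ν) (step : ν → Int → ν) :
    l.foldl (fun d b => d.modify a d0 (fun mm => step mm b)) (d.insert a m) =
      d.insert a (l.foldl step m) := by
  induction l generalizing m with
  | nil => rfl
  | cons b l ih =>
      simp only [List.foldl_cons]
      rw [show (d.insert a m).modify a d0 (fun mm => step mm b)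
            = d.insert a (step m b) from ?_, ih]
      rw [PySem.Dict.modify, PySem.Dict.getD_insert_self, PySem.Dict.insert_insert_self]

-- a no-op modify-or-skip loop is the same loop with the skip folded into the value step
theorem foldl_modify_ite {ν : Type} (l : List Int) (d : PySem.Dict Int ν) (a : Int)
    (m d0 : ν) (c : Int → Bool) (step : ν → Int → ν) :
    l.foldl (fun d b => if c b then d.modify a d0 (fun mm => step mm b) else d) (d.insert a m) =
      d.insert a (l.foldl (fun mm b => if c b then step mm b else mm) m) := by
  induction l generalizing m with
  | nil => rfl
  | cons b l ih =>
      simp only [List.foldl_cons]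
      by_cases hc : c b
      · simp only [hc, if_true]
        rw [show (d.insert a m).modify a d0 (fun mm => step mm b)
              = d.insert a (step m b) from ?_, ih]
        rw [PySem.Dict.modify, PySem.Dict.getD_insert_self, PySem.Dict.insert_insert_self]
      · simp only [hc, Bool.false_eq_true, if_false]
        exact ih m

-- one outer-loop iteration of A equals one outer-loop iteration of B
theorem step_eq (gcdlist : List Int)
    (p : PySem.Dict Int (PySem.Dict Int Int) × PySem.Dict Int (PySem.Dict Int Int)) (a : Int) :
    (PySem.List.pyRange 1 (a + 1) 1).foldl (fun q b =>
        ((if gcdlist.contains (gcdSteps a b 0).1 then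
            q.1.modify a PySem.Dict.empty (fun m =>
              if (m.get? (gcdSteps a b 0).2).isSome then
                m.insert (gcdSteps a b 0).2 (m.getD (gcdSteps a b 0).2 0 + 1)
              else m.insert (gcdSteps a b 0).2 1)
          else q.1),
         q.2.modify a PySem.Dict.empty (fun m =>
            if (m.get? (gcdSteps a b 0).2).isSome then
              m.insert (gcdSteps a b 0).2 (m.getD (gcdSteps a b 0).2 0 + 1)
            else m.insert (gcdSteps a b 0).2 1)))
      (p.1.insert a PySem.Dict.empty, p.2.insert a PySem.Dict.empty) =
    (p.1.insert a
        ((PySem.List.pyRange 1 (a + 1) 1).foldl (fun (rt : PySem.Dict Int Int × PySem.Dict Int Int) b =>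
            ((if PySem.Set.contains (PySem.Set.ofList gcdlist) |(euclidLoop a b 0).1| then
                rt.1.insert (euclidLoop a b 0).2 (rt.1.getD (euclidLoop a b 0).2 0 + 1)
              else rt.1),
             rt.2.insert (euclidLoop a b 0).2 (rt.2.getD (euclidLoop a b 0).2 0 + 1)))
          (PySem.Dict.empty, PySem.Dict.empty)).1,
     p.2.insert a
        ((PySem.List.pyRange 1 (a + 1) 1).foldl (fun (rt : PySem.Dict Int Int × PySem.Dict Int Int) b =>
            ((if PySem.Set.contains (PySem.Set.ofList gcdlist) |(euclidLoop a b 0).1| then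
                rt.1.insert (euclidLoop a b 0).2 (rt.1.getD (euclidLoop a b 0).2 0 + 1)
              else rt.1),
             rt.2.insert (euclidLoop a b 0).2 (rt.2.getD (euclidLoop a b 0).2 0 + 1)))
          (PySem.Dict.empty, PySem.Dict.empty)).2) := by
  rw [PySem.List.foldl_prod_mk
        (f := fun (q1 : PySem.Dict Int (PySem.Dict Int Int)) (b : Int) => if gcdlist.contains (gcdSteps a b 0).1 then
            q1.modify a PySem.Dict.empty (fun m =>
              if (m.get? (gcdSteps a b 0).2).isSome then
                m.insert (gcdSteps a b 0).2 (m.getD (gcdSteps a b 0).2 0 + 1)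
              else m.insert (gcdSteps a b 0).2 1)
          else q1)
        (g := fun (q2 : PySem.Dict Int (PySem.Dict Int Int)) (b : Int) => q2.modify a PySem.Dict.empty (fun m =>
            if (m.get? (gcdSteps a b 0).2).isSome then
              m.insert (gcdSteps a b 0).2 (m.getD (gcdSteps a b 0).2 0 + 1)
            else m.insert (gcdSteps a b 0).2 1))]
  rw [PySem.List.foldl_prod_mk
        (f := fun (rt1 : PySem.Dict Int Int) b =>
          if PySem.Set.contains (PySem.Set.ofList gcdlist) |(euclidLoop a b 0).1| then
            rt1.insert (euclidLoop a b 0).2 (rt1.getD (euclidLoop a b 0).2 0 + 1)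
          else rt1)
        (g := fun (rt2 : PySem.Dict Int Int) b =>
          rt2.insert (euclidLoop a b 0).2 (rt2.getD (euclidLoop a b 0).2 0 + 1))]
  dsimp only
  rw [foldl_modify_ite, foldl_modify_insert]
  refine Prod.ext ?_ ?_ <;> dsimp only <;> congr 1 <;>
    refine PySem.List.foldl_congr_mem _ _ _ _ (fun m b _ => ?_)
  · rw [gcdSteps_eq_euclidLoop, setContains_eq, innerStep_eq]
  · rw [gcdSteps_eq_euclidLoop, innerStep_eq]

-- the two outer-loop bodies are equal as functions
theorem stepfun_eq (gcdlist : List Int) :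
    (fun (p : PySem.Dict Int (PySem.Dict Int Int) × PySem.Dict Int (PySem.Dict Int Int)) (a : Int) =>
      (PySem.List.pyRange 1 (a + 1) 1).foldl (fun q b =>
          ((if gcdlist.contains (gcdSteps a b 0).1 then
              q.1.modify a PySem.Dict.empty (fun m =>
                if (m.get? (gcdSteps a b 0).2).isSome then
                  m.insert (gcdSteps a b 0).2 (m.getD (gcdSteps a b 0).2 0 + 1)
                else m.insert (gcdSteps a b 0).2 1)
            else q.1),
           q.2.modify a PySem.Dict.empty (fun m =>
              if (m.get? (gcdSteps a b 0).2).isSome then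
                m.insert (gcdSteps a b 0).2 (m.getD (gcdSteps a b 0).2 0 + 1)
              else m.insert (gcdSteps a b 0).2 1)))
        (p.1.insert a PySem.Dict.empty, p.2.insert a PySem.Dict.empty)) =
    (fun (p : PySem.Dict Int (PySem.Dict Int Int) × PySem.Dict Int (PySem.Dict Int Int)) (a : Int) =>
      (p.1.insert a
          ((PySem.List.pyRange 1 (a + 1) 1).foldl (fun (rt : PySem.Dict Int Int × PySem.Dict Int Int) b =>
              ((if PySem.Set.contains (PySem.Set.ofList gcdlist) |(euclidLoop a b 0).1| then
                  rt.1.insert (euclidLoop a b 0).2 (rt.1.getD (euclidLoop a b 0).2 0 + 1)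
                else rt.1),
               rt.2.insert (euclidLoop a b 0).2 (rt.2.getD (euclidLoop a b 0).2 0 + 1)))
            (PySem.Dict.empty, PySem.Dict.empty)).1,
       p.2.insert a
          ((PySem.List.pyRange 1 (a + 1) 1).foldl (fun (rt : PySem.Dict Int Int × PySem.Dict Int Int) b =>
              ((if PySem.Set.contains (PySem.Set.ofList gcdlist) |(euclidLoop a b 0).1| then
                  rt.1.insert (euclidLoop a b 0).2 (rt.1.getD (euclidLoop a b 0).2 0 + 1)
                else rt.1),
               rt.2.insert (euclidLoop a b 0).2 (rt.2.getD (euclidLoop a b 0).2 0 + 1)))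
            (PySem.Dict.empty, PySem.Dict.empty)).2)) :=
  funext fun p => funext fun a => step_eq gcdlist p a

-- ===== VERDICT (by name: the statement is the Claim_ definition above) =====
theorem heilbronn_spec : Claim_equal_heilbronn := by
  intro gcdlist list1 _
  unfold Spec_heilbronn heilbronn heilbronn_alt
  simp only []
  rw [stepfun_eq gcdlist]
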